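-- pv_equiv track=rewrite | github.com/fpachet/max_entropy | maxent_np/intervals.py | count_strict_overlaps
-- ===== SOURCE A (Python) =====
-- from bisect import bisect_left, bisect_right
--
-- def count_strict_overlaps(intervals):
--     """
--     Given a list of intervals [(a1, b1), (a2, b2), ..., (an, bn)],
--     returns a list 'overlaps' where overlaps[k] is the number of intervals
--     that strictly overlap the interval intervals[k].
--
--     Two intervals [a_i, b_i] and [a_j, b_j] are said to *strictly overlap* if:
--         a_i < b_j  AND  a_j < b_i
--
--     Complexity: O(n log n)
--     """
--
--     # Sort all starts and ends separately
--     starts = sorted(a for (a, b) in intervals)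
--     ends = sorted(b for (a, b) in intervals)
--
--     overlaps = []
--
--     for a, b in intervals:
--         # 1) Count how many intervals start before b  -> a_j < b
--         #    bisect_left(starts, b) gives the index where b would be inserted
--         #    to keep 'starts' sorted, i.e. the count of starts < b.
--         left_count = bisect_left(starts, b)
--
--         # 2) Count how many intervals end on or before a -> b_j <= a
--         #    bisect_right(ends, a) gives the insertion index for 'a' in 'ends',
--         #    i.e. the count of ends <= a.
--         right_count = bisect_right(ends, a)
--
--         # The difference gives the number of intervals J_j satisfying
--         # a_j < b and b_j > a. However, this also includes the interval J_k itself
--         # if it meets a < b_k (which it should, assuming a < b), so subtract 1.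
--         overlap_count = (left_count - right_count) - 1
--
--         overlaps.append(overlap_count)
--
--     return overlaps
-- ===== SOURCE B (Python) =====
-- def count_strict_overlaps(intervals):
--     """
--     Same result as the sort+bisect version, computed by direct pairwise
--     counting: for each interval (a, b), count intervals starting before b
--     and subtract those ending at or before a, minus 1 for the interval itself.
--     """
--     return [
--         sum(1 for (a2, b2) in intervals if a2 < b)
--         - sum(1 for (a2, b2) in intervals if b2 <= a)
--         - 1
--         for (a, b) in intervals
--     ]
-- ===== Notes on version B (the rewrite author's own statement) =====
-- stated objective: simpler
-- what changed: Replaced the sort-both-endpoint-lists-plus-binary-search machinery with a direct pairwise scan: for each interval, count starts before b and ends at or before a by linear counting, subtract, minus 1.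
import Mathlib
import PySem

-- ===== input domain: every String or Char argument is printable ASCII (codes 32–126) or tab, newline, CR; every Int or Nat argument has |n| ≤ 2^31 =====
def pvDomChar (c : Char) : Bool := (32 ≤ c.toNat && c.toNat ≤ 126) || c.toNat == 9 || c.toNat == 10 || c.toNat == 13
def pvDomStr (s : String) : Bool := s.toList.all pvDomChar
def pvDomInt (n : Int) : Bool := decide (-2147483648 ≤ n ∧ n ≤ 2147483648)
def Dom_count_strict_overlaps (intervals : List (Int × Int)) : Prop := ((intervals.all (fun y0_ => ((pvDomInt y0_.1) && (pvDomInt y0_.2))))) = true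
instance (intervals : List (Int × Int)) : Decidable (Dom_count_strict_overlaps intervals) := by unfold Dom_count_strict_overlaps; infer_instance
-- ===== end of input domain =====

-- B replaces A's sort + binary-search counting with a direct pairwise scan (simpler, no sorting).

-- ===== PORT A =====
def count_strict_overlaps (intervals : List (Int × Int)) : List Int :=
  let starts := PySem.List.sorted (intervals.map (fun ab => ab.1)) (fun x => x)
  let ends := PySem.List.sorted (intervals.map (fun ab => ab.2)) (fun x => x)
  intervals.foldl (fun overlaps ab =>
    let left_count := PySem.List.bisectLeft starts ab.2
    let right_count := PySem.List.bisectRight ends ab.1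
    overlaps ++ [((left_count : Int) - (right_count : Int)) - 1]) []

-- ===== PORT B =====
def count_strict_overlaps_alt (intervals : List (Int × Int)) : List Int :=
  intervals.map (fun ab =>
    ((intervals.countP (fun q => decide (q.1 < ab.2)) : Int)
      - (intervals.countP (fun q => decide (q.2 ≤ ab.1)) : Int)) - 1)

-- ===== PRECONDITION & SPEC =====
def Spec_count_strict_overlaps (intervals : List (Int × Int)) (out : List Int) : Prop := out = count_strict_overlaps_alt intervals
instance (intervals : List (Int × Int)) (out : List Int) : Decidable (Spec_count_strict_overlaps intervals out) := by unfold Spec_count_strict_overlaps; infer_instance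

-- ===== CLAIM (what is proved, stated in full; the proofs are below) =====
def Claim_equal_count_strict_overlaps : Prop := ∀ (intervals : List (Int × Int)), Dom_count_strict_overlaps intervals → Spec_count_strict_overlaps intervals (count_strict_overlaps intervals)

-- ===== LEMMAS AND PROOFS =====

-- the append-loop builds exactly the map
theorem foldl_append_map {α β : Type} (f : α → β) (xs : List α) (acc : List β) :
    List.foldl (fun a x => a ++ [f x]) acc xs = acc ++ xs.map f := by
  induction xs generalizing acc with
  | nil => simp
  | cons x xs ih => simp [List.foldl, ih]

-- a partition point of a sorted list counts the elements satisfying the (downward-closed) predicate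
theorem countP_of_partition (xs : List Int) (p : Int → Bool) (k : Nat)
    (hk : k ≤ xs.length)
    (hlo : ∀ (j : Nat) (hj : j < xs.length), j < k → p xs[j] = true)
    (hhi : ∀ (j : Nat) (hj : j < xs.length), k ≤ j → p xs[j] = false) :
    xs.countP p = k := by
  have hsplit : xs = xs.take k ++ xs.drop k := by simp
  rw [hsplit, List.countP_append]
  have h1 : (xs.take k).countP p = (xs.take k).length := by
    apply List.countP_eq_length.2
    intro a ha
    obtain ⟨j, hj, rfl⟩ := List.mem_iff_getElem.1 ha
    have hj' : j < xs.length := by simp at hj; omega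
    have hjk : j < k := by simp at hj; omega
    simpa [List.getElem_take] using hlo j hj' hjk
  have h2 : (xs.drop k).countP p = 0 := by
    apply List.countP_eq_zero.2
    intro a ha
    obtain ⟨j, hj, rfl⟩ := List.mem_iff_getElem.1 ha
    have hj' : k + j < xs.length := by simp [List.length_drop] at hj; omega
    have hgd : (xs.drop k)[j] = xs[k + j]'hj' := by
      simp [List.getElem_drop]
    rw [hgd]
    simp [hhi (k + j) hj' (Nat.le_add_right _ _)]
  rw [h1, h2]
  simp [List.length_take]
  omega

theorem bisectLeft_countP (xs : List Int) (x : Int)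
    (hs : List.Pairwise (fun a b => a ≤ b) xs) :
    PySem.List.bisectLeft xs x = xs.countP (fun y => decide (y < x)) := by
  obtain ⟨hle, hlo, hhi⟩ := PySem.List.bisectLeft_spec xs x hs
  exact (countP_of_partition xs _ _ hle
    (fun j hj hjk => by simpa using hlo j hj hjk)
    (fun j hj hjk => by simpa using hhi j hj hjk)).symm

theorem bisectRight_countP (xs : List Int) (x : Int)
    (hs : List.Pairwise (fun a b => a ≤ b) xs) :
    PySem.List.bisectRight xs x = xs.countP (fun y => decide (y ≤ x)) := by
  obtain ⟨hle, hlo, hhi⟩ := PySem.List.bisectRight_spec xs x hs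
  exact (countP_of_partition xs _ _ hle
    (fun j hj hjk => by simpa using hlo j hj hjk)
    (fun j hj hjk => by simpa [not_le] using hhi j hj hjk)).symm

-- countP over the sorted endpoint list = countP over the interval list itself
theorem countP_sorted_map (intervals : List (Int × Int)) (f : Int × Int → Int) (p : Int → Bool) :
    (PySem.List.sorted (intervals.map f) (fun x => x)).countP p
      = intervals.countP (fun q => p (f q)) := by
  rw [(PySem.List.sorted_perm (intervals.map f) (fun x => x) false).countP_eq,
    List.countP_map]
  rfl

-- ===== VERDICT (by name: the statement is the Claim_ definition above) =====
theorem count_strict_overlaps_spec : Claim_equal_count_strict_overlaps := by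
  intro intervals _
  unfold Spec_count_strict_overlaps count_strict_overlaps count_strict_overlaps_alt
  rw [foldl_append_map]
  simp only [List.nil_append]
  apply List.map_congr_left
  intro ab _
  have hs1 : List.Pairwise (fun a b : Int => a ≤ b)
      (PySem.List.sorted (intervals.map (fun ab => ab.1)) (fun x => x)) := by
    simpa using PySem.List.sorted_pairwise (intervals.map (fun ab => ab.1)) (fun x => x)
  have hs2 : List.Pairwise (fun a b : Int => a ≤ b)
      (PySem.List.sorted (intervals.map (fun ab => ab.2)) (fun x => x)) := by
    simpa using PySem.List.sorted_pairwise (intervals.map (fun ab => ab.2)) (fun x => x)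
  rw [bisectLeft_countP _ _ hs1, bisectRight_countP _ _ hs2,
    countP_sorted_map, countP_sorted_map]
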